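-- pv_equiv track=rewrite | github.com/Zimmermann25/InterviewBit | Math/Python/NextSmallestPalindrome.py | doPalindrome
-- ===== SOURCE A (Python) =====
-- def doPalindrome(A):
--     i = 0
--     j = len(A)-1
--     tempArr = [A[i] for i in range(len(A))]
--     while i < j:
--         tempArr[j]=tempArr[i]
--         i+=1
--         j-=1
--     return "".join(map(str, tempArr))
-- ===== SOURCE B (Python) =====
-- def doPalindrome(A):
--     half = len(A) // 2
--     left = A[:half]
--     middle = A[half:len(A) - half]
--     return "".join(map(str, left + middle + left[::-1]))
-- ===== Notes on version B (the rewrite author's own statement) =====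
-- stated objective: simpler
-- what changed: Replaced the two-pointer in-place overwrite loop by direct construction: slice off the left half and middle, and concatenate left + middle + reversed(left).
import Mathlib
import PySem

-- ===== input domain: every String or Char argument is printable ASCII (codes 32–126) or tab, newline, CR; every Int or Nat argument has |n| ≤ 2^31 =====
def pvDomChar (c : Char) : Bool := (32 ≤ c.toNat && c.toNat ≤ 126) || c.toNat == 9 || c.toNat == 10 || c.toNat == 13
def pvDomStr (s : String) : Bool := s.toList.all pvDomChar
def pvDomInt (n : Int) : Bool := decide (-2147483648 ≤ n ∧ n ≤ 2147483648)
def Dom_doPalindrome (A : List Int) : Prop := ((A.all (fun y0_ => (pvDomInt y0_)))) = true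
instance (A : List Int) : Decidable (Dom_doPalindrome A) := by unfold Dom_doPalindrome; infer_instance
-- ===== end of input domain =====

-- B mirrors the left half by slicing and concatenation instead of A's two-pointer overwrite loop (objective: simpler).

-- ===== PORT A =====
-- the while loop: i, j are Python ints; inside the loop 0 ≤ i < j < len, so .toNat is exact there
def doPalindromeLoop (t : List Int) (i j : Int) : List Int :=
  if i < j then
    doPalindromeLoop (t.set j.toNat (t.getD i.toNat 0)) (i + 1) (j - 1)
  else t
termination_by (j - i).toNat
decreasing_by omega

def doPalindrome (A : List Int) : String :=
  let i : Int := 0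
  let j : Int := (A.length : Int) - 1
  -- tempArr = [A[i] for i in range(len(A))]; every index is in range, so the default 0 is never used
  let tempArr := (PySem.List.pyRange 0 (A.length : Int) 1).map (fun k => PySem.List.pyGetD A k 0)
  PySem.Str.join "" ((doPalindromeLoop tempArr i j).map PySem.Int.toStr)

-- ===== PORT B =====
def doPalindrome_alt (A : List Int) : String :=
  let half : Int := (A.length : Int) / 2
  let left := PySem.List.slice A none (some half)
  let middle := PySem.List.slice A (some half) (some ((A.length : Int) - half))
  -- left[::-1]; slice? with step -1 always returns some
  let revLeft := (PySem.List.slice? left none none (-1)).getD []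
  PySem.Str.join "" ((left ++ middle ++ revLeft).map PySem.Int.toStr)

-- ===== PRECONDITION & SPEC =====
def Spec_doPalindrome (A : List Int) (out : String) : Prop := out = doPalindrome_alt A
instance (A : List Int) (out : String) : Decidable (Spec_doPalindrome A out) := by unfold Spec_doPalindrome; infer_instance

-- ===== CLAIM (what is proved, stated in full; the proofs are below) =====
def Claim_equal_doPalindrome : Prop := ∀ (A : List Int), Dom_doPalindrome A → Spec_doPalindrome A (doPalindrome A)

-- ===== LEMMAS AND PROOFS =====

-- Characterisation of A's loop: with i + j fixed (= s), the loop returns the prefix up to the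
-- midpoint unchanged, then the mirror of the segment [i, j - s/2) reversed, then the untouched tail.
lemma doPalindromeLoop_eq (k : Nat) : ∀ (t : List Int) (i j : Nat), j - i ≤ k → j < t.length → i ≤ j + 1 →
    doPalindromeLoop t (i : Int) (j : Int) =
      t.take ((i + j) / 2 + 1) ++ ((t.drop i).take (j - (i + j) / 2)).reverse ++ t.drop (j + 1) := by
  induction k with
  | zero =>
    intro t i j hk hj hij
    have hji : j ≤ i := by omega
    rw [doPalindromeLoop]
    have : ¬ ((i : Int) < (j : Int)) := by exact_mod_cast fun h => absurd hji (by omega)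
    rw [if_neg this]
    -- i = j or i = j + 1; in both cases (i+j)/2 + 1 = j + 1 and j - (i+j)/2 = 0
    have h1 : (i + j) / 2 + 1 = j + 1 := by omega
    have h2 : j - (i + j) / 2 = 0 := by omega
    rw [h1, h2]
    simp [List.take_append_drop]
  | succ k ih =>
    intro t i j hk hj hij
    by_cases hlt : i < j
    · rw [doPalindromeLoop]
      have hlt' : (i : Int) < (j : Int) := by exact_mod_cast hlt
      rw [if_pos hlt']
      have hjt : (j : Int).toNat = j := by omega
      have hit : (i : Int).toNat = i := by omega
      set t' := t.set j (t.getD i 0) with ht'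
      have hcast1 : (i : Int) + 1 = ((i + 1 : Nat) : Int) := by push_cast; ring
      have hcast2 : (j : Int) - 1 = ((j - 1 : Nat) : Int) := by omega
      rw [hjt, hit, ← ht', hcast1, hcast2]
      have hlen' : t'.length = t.length := by simp [ht']
      have hrec := ih t' (i + 1) (j - 1) (by omega) (by omega) (by omega)
      rw [hrec]
      have hs : (i + 1) + (j - 1) = i + j := by omega
      rw [hs]
      have hmid : (i + j) / 2 + 1 ≤ j := by omega
      -- (a) prefix untouched by the set at j
      have ha : t'.take ((i + j) / 2 + 1) = t.take ((i + j) / 2 + 1) := by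
        apply List.ext_getElem
        · simp [ht']
        · intro m hm1 hm2
          simp only [List.getElem_take, ht']
          rw [List.getElem_set_ne]
          simp at hm1
          omega
      -- (c) the mirrored source segment is untouched (its indices are < j)
      have hc : (t'.drop (i + 1)).take ((j - 1) - (i + j) / 2)
              = (t.drop (i + 1)).take ((j - 1) - (i + j) / 2) := by
        apply List.ext_getElem
        · simp [ht']
        · intro m hm1 hm2
          simp only [List.getElem_take, List.getElem_drop, ht']
          rw [List.getElem_set_ne]
          simp only [List.length_take, List.length_drop, ht', List.length_set] at hm1
          omega
      -- (b) the tail after the write: position j now holds t[i]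
      have hb : t'.drop j = t.getD i 0 :: t.drop (j + 1) := by
        have hjlen : j < t'.length := by omega
        rw [List.drop_eq_getElem_cons hjlen]
        congr 1
        · simp [ht', List.getElem_set_self]
        · apply List.ext_getElem
          · simp [ht']
          · intro m hm1 hm2
            simp only [List.getElem_drop, ht']
            rw [List.getElem_set_ne]
            omega
      -- (d) expand the RHS mirror segment by one element at the front
      have hd : (t.drop i).take (j - (i + j) / 2)
              = t.getD i 0 :: (t.drop (i + 1)).take ((j - 1) - (i + j) / 2) := by
        have hilen : i < t.length := by omega
        rw [List.drop_eq_getElem_cons hilen]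
        have hsplit : j - (i + j) / 2 = ((j - 1) - (i + j) / 2) + 1 := by omega
        rw [hsplit, List.take_succ_cons]
        congr 1
        exact (List.getD_eq_getElem t 0 hilen).symm
      have hj1 : j - 1 + 1 = j := by omega
      rw [hj1, ha, hc, hb, hd]
      simp [List.append_assoc]
    · -- loop does not run
      rw [doPalindromeLoop]
      have : ¬ ((i : Int) < (j : Int)) := by exact_mod_cast hlt
      rw [if_neg this]
      have h1 : (i + j) / 2 + 1 = j + 1 := by omega
      have h2 : j - (i + j) / 2 = 0 := by omega
      rw [h1, h2]
      simp [List.take_append_drop]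

-- the comprehension [A[i] for i in range(len(A))] is A itself
lemma tempArr_eq (A : List Int) :
    (PySem.List.pyRange 0 (A.length : Int) 1).map (fun k => PySem.List.pyGetD A k 0) = A :=
  PySem.List.map_pyGetD_pyRange_zero A 0

theorem doPalindrome_spec : Claim_equal_doPalindrome := by
  unfold Claim_equal_doPalindrome
  intro A _
  unfold Spec_doPalindrome doPalindrome doPalindrome_alt
  simp only []
  rw [tempArr_eq]
  by_cases hA : A = []
  · subst hA
    simp [doPalindromeLoop, PySem.List.slice, PySem.List.slice?_none_none_neg_one]
  · have hn : 1 ≤ A.length := List.length_pos_iff.mpr hA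
    set n := A.length with hnn
    have hcast1 : (n : Int) - 1 = ((n - 1 : Nat) : Int) := by omega
    have hloop := doPalindromeLoop_eq (n - 1) A 0 (n - 1) (by omega) (by omega) (by omega)
    simp only [Nat.cast_zero] at hloop
    rw [hcast1, hloop]
    -- simplify B's slices
    have hhalf : (n : Int) / 2 = ((n / 2 : Nat) : Int) := by omega
    have hnh : (n : Int) - ((n / 2 : Nat) : Int) = ((n - n / 2 : Nat) : Int) := by omega
    rw [hhalf, hnh, PySem.List.slice_to_natCast, PySem.List.slice_natCast,
        PySem.List.slice?_none_none_neg_one]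
    simp only [Option.getD_some]
    refine congrArg _ (congrArg _ ?_)
    have e1 : (0 + (n - 1)) / 2 + 1 = n - n / 2 := by omega
    have e2 : (n - 1) - (0 + (n - 1)) / 2 = n / 2 := by omega
    rw [e1, e2]
    simp only [List.drop_zero]
    have e4 : n - 1 + 1 = n := by omega
    have e5 : List.drop n A = [] := by rw [hnn]; exact List.drop_length
    rw [e4, e5, List.append_nil]
    conv_lhs => rw [show n - n / 2 = n / 2 + (n - n / 2 - n / 2) from by omega, List.take_add]
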